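-- pv_equiv track=rewrite | github.com/GouBuliya/beimeng_workspace | packages/mcp_file_info/parser.py | _extract_singleline_comments
-- ===== SOURCE A (Python) =====
-- def _extract_singleline_comments(content: str, marker: str) -> str:
--     """提取连续的单行注释.
--
--     Args:
--         content: 文件内容
--         marker: 注释标记
--
--     Returns:
--         提取的注释内容
--     """
--     lines = content.split("\n")
--     comment_lines = []
--     started = False
--
--     for line in lines:
--         stripped = line.strip()
--         if stripped.startswith(marker):
--             started = True
--             # 移除注释标记
--             comment_line = stripped[len(marker) :].lstrip()
--             comment_lines.append(comment_line)
--         elif started and stripped: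
--             # 遇到非注释的非空行，停止
--             break
--         elif started and not stripped:
--             # 空行也加入
--             comment_lines.append("")
--
--     return "\n".join(comment_lines).strip()
-- ===== SOURCE B (Python) =====
-- def _extract_singleline_comments(content: str, marker: str) -> str:
--     """Two-phase scan: drop lines until the first comment line, then take the
--     contiguous run of comment-or-blank lines, then map and join."""
--     lines = content.split("\n")
--     # phase 1: drop every leading line that is not a comment
--     while lines and not lines[0].strip().startswith(marker):
--         lines = lines[1:]
--     # phase 2: take the contiguous run of comment lines / blank lines
--     run = []
--     while lines and (lines[0].strip().startswith(marker) or not lines[0].strip()):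
--         run.append(lines[0])
--         lines = lines[1:]
--     parts = [l.strip()[len(marker):].lstrip() if l.strip().startswith(marker) else ""
--              for l in run]
--     return "\n".join(parts).strip()
-- ===== Notes on version B (the rewrite author's own statement) =====
-- stated objective: alternative
-- what changed: Replaced A's single stateful loop with a `started` flag by a two-phase decomposition: drop the leading non-comment lines, take the contiguous comment-or-blank run, then map each line and join.
import Mathlib
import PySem

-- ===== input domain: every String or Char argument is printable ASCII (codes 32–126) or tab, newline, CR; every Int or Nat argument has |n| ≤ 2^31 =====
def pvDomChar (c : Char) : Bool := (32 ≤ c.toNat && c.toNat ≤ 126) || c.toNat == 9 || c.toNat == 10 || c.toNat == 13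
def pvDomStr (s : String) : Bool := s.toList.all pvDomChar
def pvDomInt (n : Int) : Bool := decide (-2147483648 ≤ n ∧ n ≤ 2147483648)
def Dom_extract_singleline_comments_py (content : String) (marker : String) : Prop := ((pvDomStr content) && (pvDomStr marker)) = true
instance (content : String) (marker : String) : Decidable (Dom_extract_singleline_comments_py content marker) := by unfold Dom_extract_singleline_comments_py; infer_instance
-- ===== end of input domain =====

-- ===== PORT A =====
-- A: single stateful loop over the lines with a `started` flag.
def pvStripTail (marker stripped : String) : String :=
  PySem.Str.lstrip (PySem.Str.slice stripped (some (PySem.Str.len marker)) none)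

def pvA_loop (marker : String) : List String → List String → Bool → List String
  | [], acc, _ => acc
  | l :: ls, acc, started =>
    let stripped := PySem.Str.strip l
    if PySem.Str.startswith stripped marker then
      pvA_loop marker ls (acc ++ [pvStripTail marker stripped]) true
    else if started && !(stripped == "") then acc
    else if started && (stripped == "") then pvA_loop marker ls (acc ++ [""]) started
    else pvA_loop marker ls acc started

def extract_singleline_comments_py (content : String) (marker : String) : String :=
  PySem.Str.strip (PySem.Str.join "\n" (pvA_loop marker ((PySem.Str.split? content "\n").getD []) [] false))

-- ===== PORT B =====
-- B: drop the non-comment prefix, take the comment-or-blank run, map, join.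
def pvIsC (marker l : String) : Bool := PySem.Str.startswith (PySem.Str.strip l) marker

def pvBlank (l : String) : Bool := PySem.Str.strip l == ""

def pvDropPhase (marker : String) : List String → List String
  | [] => []
  | l :: ls => if pvIsC marker l then l :: ls else pvDropPhase marker ls

def pvTakePhase (marker : String) : List String → List String
  | [] => []
  | l :: ls => if pvIsC marker l || pvBlank l then l :: pvTakePhase marker ls else []

def pvMapLine (marker l : String) : String :=
  if pvIsC marker l then pvStripTail marker (PySem.Str.strip l) else ""

def extract_singleline_comments_py_alt (content : String) (marker : String) : String :=
  PySem.Str.strip (PySem.Str.join "\n"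
    ((pvTakePhase marker (pvDropPhase marker ((PySem.Str.split? content "\n").getD []))).map (pvMapLine marker)))

-- ===== PRECONDITION & SPEC =====
def Spec_extract_singleline_comments_py (content : String) (marker : String) (out : String) : Prop := out = extract_singleline_comments_py_alt content marker
instance (content : String) (marker : String) (out : String) : Decidable (Spec_extract_singleline_comments_py content marker out) := by unfold Spec_extract_singleline_comments_py; infer_instance

-- ===== CLAIM (what is proved, stated in full; the proofs are below) =====
def Claim_equal_extract_singleline_comments_py : Prop := ∀ (content : String) (marker : String), Dom_extract_singleline_comments_py content marker → Spec_extract_singleline_comments_py content marker (extract_singleline_comments_py content marker)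

-- ===== LEMMAS AND PROOFS =====
lemma pvA_loop_true (marker : String) : ∀ (ls acc : List String),
    pvA_loop marker ls acc true = acc ++ (pvTakePhase marker ls).map (pvMapLine marker) := by
  intro ls
  induction ls with
  | nil => intro acc; simp [pvA_loop, pvTakePhase]
  | cons l ls ih =>
    intro acc
    by_cases hc : pvIsC marker l = true
    · have hc' : PySem.Str.startswith (PySem.Str.strip l) marker = true := hc
      simp only [pvA_loop, pvTakePhase]
      rw [if_pos hc', if_pos (by rw [hc]; rfl), ih]
      simp [pvMapLine, hc]
    · have hcF : pvIsC marker l = false := Bool.eq_false_iff.mpr hc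
      have hc' : ¬ PySem.Str.startswith (PySem.Str.strip l) marker = true := hc
      simp only [pvA_loop, pvTakePhase]
      rw [if_neg hc']
      by_cases hb : pvBlank l = true
      · have hb' : (PySem.Str.strip l == "") = true := hb
        rw [if_neg (by simp [hb']), if_pos (by simp [hb']), ih,
            if_pos (by rw [hb]; simp)]
        simp [pvMapLine, hcF]
      · have hbF : pvBlank l = false := Bool.eq_false_iff.mpr hb
        have hb' : (PySem.Str.strip l == "") = false := hbF
        rw [if_pos (by simp [hb']), if_neg (by rw [hcF, hbF]; simp)]
        simp

lemma pvA_loop_false (marker : String) : ∀ (ls acc : List String),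
    pvA_loop marker ls acc false
      = acc ++ (pvTakePhase marker (pvDropPhase marker ls)).map (pvMapLine marker) := by
  intro ls
  induction ls with
  | nil => intro acc; simp [pvA_loop, pvDropPhase, pvTakePhase]
  | cons l ls ih =>
    intro acc
    by_cases hc : pvIsC marker l = true
    · have hc' : PySem.Str.startswith (PySem.Str.strip l) marker = true := hc
      simp only [pvA_loop, pvDropPhase]
      rw [if_pos hc', if_pos hc, pvA_loop_true]
      simp only [pvTakePhase]
      rw [if_pos (by rw [hc]; rfl)]
      simp [pvMapLine, hc]
    · have hcF : pvIsC marker l = false := Bool.eq_false_iff.mpr hc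
      have hc' : ¬ PySem.Str.startswith (PySem.Str.strip l) marker = true := hc
      simp only [pvA_loop, pvDropPhase]
      rw [if_neg hc', if_neg hc]
      simp only [Bool.false_and]
      rw [if_neg (by simp), if_neg (by simp)]
      exact ih acc

-- ===== VERDICT (by name: the statement is the Claim_ definition above) =====
theorem extract_singleline_comments_py_spec : Claim_equal_extract_singleline_comments_py := by
  intro content marker _
  unfold Spec_extract_singleline_comments_py
  unfold extract_singleline_comments_py extract_singleline_comments_py_alt
  rw [pvA_loop_false]
  simp
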